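-- pv_equiv track=rewrite | github.com/suniyya/similarities-v2 | analysis/describe_data.py | group_trials_by_ref
-- ===== SOURCE A (Python) =====
-- def group_trials_by_ref(trials):
--     grouped = {}
--     for trial in trials:
--         reference = trial.split(':')[0]
--         if reference not in grouped:
--             grouped[reference] = {}
--         grouped[reference][trial] = trials[trial]
--     return grouped
-- ===== SOURCE B (Python) =====
-- def group_trials_by_ref(trials):
--     # Alternative decomposition: collect the distinct reference prefixes first
--     # (first-occurrence order), then build each group by filtering the dict once per
--     # reference, instead of one-pass hash bucketing.
--     refs = dict.fromkeys(t.split(':')[0] for t in trials)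
--     return {r: {t: v for t, v in trials.items() if t.split(':')[0] == r}
--             for r in refs}
-- ===== Notes on version B (the rewrite author's own statement) =====
-- stated objective: alternative
-- what changed: A buckets entries into a dict-of-dicts in one pass; B first deduplicates the reference prefixes (dict.fromkeys) and then builds each group by filtering the trials once per distinct reference.
import Mathlib
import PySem

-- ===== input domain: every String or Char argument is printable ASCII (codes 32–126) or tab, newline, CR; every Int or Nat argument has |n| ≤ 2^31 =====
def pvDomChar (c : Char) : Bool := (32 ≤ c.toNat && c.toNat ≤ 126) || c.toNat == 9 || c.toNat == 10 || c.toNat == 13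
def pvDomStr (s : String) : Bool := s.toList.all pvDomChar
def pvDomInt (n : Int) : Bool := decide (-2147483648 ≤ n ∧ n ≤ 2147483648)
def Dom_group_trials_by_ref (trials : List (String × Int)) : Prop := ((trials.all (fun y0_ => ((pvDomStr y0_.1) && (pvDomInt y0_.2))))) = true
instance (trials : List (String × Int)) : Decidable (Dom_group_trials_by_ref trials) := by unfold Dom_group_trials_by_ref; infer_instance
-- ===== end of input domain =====

-- B replaces A's one-pass hash bucketing by a two-phase decomposition (dedup the
-- reference prefixes, then build each group by filtering per reference); objective:
-- alternative (not faster).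


-- ===== PORT A =====
-- trial.split(':')[0]; split with a non-empty separator never fails and never
-- returns an empty list, so the getD/headD defaults are unreachable guards.
def refOf (s : String) : String := ((PySem.Str.split? s ":").getD []).headD ""

def group_trials_by_ref (trials : List (String × Int)) : List (String × List (String × Int)) :=
  let trialsD : PySem.Dict String Int := PySem.Dict.mk trials
  let grouped : PySem.Dict String (PySem.Dict String Int) :=
    trials.foldl (fun g p =>
      let reference := refOf p.1
      let g := if g.contains reference then g else g.insert reference PySem.Dict.empty
      g.modify reference PySem.Dict.empty (fun inner => inner.insert p.1 (trialsD.getD p.1 0)))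
      PySem.Dict.empty
  grouped.items.map (fun q => (q.1, q.2.items))

-- ===== PORT B =====
def group_trials_by_ref_alt (trials : List (String × Int)) : List (String × List (String × Int)) :=
  (PySem.List.dedup (trials.map (fun p => refOf p.1))).map
    (fun r => (r, trials.filter (fun p => refOf p.1 == r)))

-- ===== PRECONDITION & SPEC =====
-- Pre_ excludes association lists with duplicate keys: they do not encode any Python
-- dict (A's argument is a dict), and on them A's overwrite-in-place vs B's keep-both
-- behaviour is an accident of the encoding.
def Pre_group_trials_by_ref (trials : List (String × Int)) : Prop :=
  (trials.map Prod.fst).Nodup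

instance (trials : List (String × Int)) : Decidable (Pre_group_trials_by_ref trials) := by
  unfold Pre_group_trials_by_ref; infer_instance

def pvWitness_group_trials_by_ref : (List (String × Int)) :=
  [("a:1", 1), ("a:2", 2), ("b:1", 3)]

def Spec_group_trials_by_ref (trials : List (String × Int)) (out : List (String × List (String × Int))) : Prop := out = group_trials_by_ref_alt trials
instance (trials : List (String × Int)) (out : List (String × List (String × Int))) : Decidable (Spec_group_trials_by_ref trials out) := by unfold Spec_group_trials_by_ref; infer_instance

-- ===== CLAIM (what is proved, stated in full; the proofs are below) =====
def Claim_equal_group_trials_by_ref : Prop := ∀ (trials : List (String × Int)), Dom_group_trials_by_ref trials → Pre_group_trials_by_ref trials → Spec_group_trials_by_ref trials (group_trials_by_ref trials)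


-- ===== LEMMAS AND PROOFS =====

-- simplified A-step (division lookup already resolved to the pair's own value)
def stepB (g : PySem.Dict String (PySem.Dict String Int)) (p : String × Int) :
    PySem.Dict String (PySem.Dict String Int) :=
  g.insert (refOf p.1) ((g.getD (refOf p.1) PySem.Dict.empty).insert p.1 p.2)

theorem dict_eq_of_items {κ ν : Type} (d e : PySem.Dict κ ν) (h : d.items = e.items) : d = e := by
  cases d; cases e; simpa [PySem.Dict.items] using h

-- A's loop body equals stepB on the entries of a duplicate-free trials list
theorem foldA_eq_foldB (trials : List (String × Int)) (hnd : (trials.map Prod.fst).Nodup) :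
    trials.foldl (fun g p =>
      let reference := refOf p.1
      let g := if g.contains reference then g else g.insert reference PySem.Dict.empty
      g.modify reference PySem.Dict.empty
        (fun inner => inner.insert p.1 ((PySem.Dict.mk trials).getD p.1 0)))
      PySem.Dict.empty
    = trials.foldl stepB PySem.Dict.empty := by
  apply PySem.List.foldl_congr_mem
  intro g p hp
  have hv : (PySem.Dict.mk trials).getD p.1 0 = p.2 := by
    have hmem : (p.1, p.2) ∈ (PySem.Dict.mk trials).items := by
      simpa [PySem.Dict.items] using hp
    exact PySem.Dict.getD_of_mem_items _ hmem (by simpa [PySem.Dict.keys, PySem.Dict.items] using hnd) 0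
  by_cases hc : g.contains (refOf p.1)
  · simp [hc, PySem.Dict.modify, stepB, hv]
  · simp only [hc, Bool.false_eq_true, if_false, PySem.Dict.modify, hv, stepB,
      PySem.Dict.getD_insert_self]
    apply dict_eq_of_items
    rw [PySem.Dict.items_insert_of_contains _ _ (PySem.Dict.contains_insert_self g _ _),
        PySem.Dict.items_insert_of_not_contains _ _ (by simpa using hc),
        PySem.Dict.items_insert_of_not_contains _ _ (by simpa using hc),
        PySem.Dict.getD_of_not_contains _ _ (by simpa using hc)]
    rw [List.map_append]
    have hnr : ∀ q ∈ g.items, q.1 ≠ refOf p.1 := by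
      intro q hq
      have : refOf p.1 ∉ g.keys := by
        intro hmem
        exact absurd ((PySem.Dict.contains_iff_mem_keys g _).mpr hmem) (by simpa using hc)
      intro h; exact this (h ▸ List.mem_map_of_mem hq)
    have hid : ∀ q ∈ g.items,
        (if q.1 = refOf p.1 then (refOf p.1, PySem.Dict.empty.insert p.1 p.2) else q) = q := by
      intro q hq; simp [hnr q hq]
    simp only [beq_iff_eq]
    simpa using List.map_congr_left (g := fun q => q) hid

theorem keys_stepB (g : PySem.Dict String (PySem.Dict String Int)) (p : String × Int) :
    (stepB g p).keys = PySem.Set.add g.keys (refOf p.1) := by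
  by_cases hc : g.contains (refOf p.1)
  · rw [stepB, PySem.Dict.keys_insert_of_contains _ _ hc]
    have hm : refOf p.1 ∈ g.keys := (PySem.Dict.contains_iff_mem_keys g _).mp hc
    simp [PySem.Set.add, PySem.Set.contains, hm]
  · rw [stepB, PySem.Dict.keys_insert_of_not_contains _ _ (by simpa using hc)]
    have hm : refOf p.1 ∉ g.keys := fun hmem =>
      absurd ((PySem.Dict.contains_iff_mem_keys g _).mpr hmem) (by simpa using hc)
    simp [PySem.Set.add, PySem.Set.contains, hm]

theorem keys_foldB : ∀ (l : List (String × Int)) (g : PySem.Dict String (PySem.Dict String Int)),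
    (l.foldl stepB g).keys = PySem.Set.update g.keys (l.map (fun p => refOf p.1)) := by
  intro l
  induction l with
  | nil => intro g; rfl
  | cons p l ih =>
      intro g
      simp only [List.foldl_cons, List.map_cons, PySem.Set.update, List.foldl_cons]
      rw [ih (stepB g p), keys_stepB]
      rfl

theorem getD_foldB : ∀ (l : List (String × Int)) (g : PySem.Dict String (PySem.Dict String Int)) (r : String),
    (l.foldl stepB g).getD r PySem.Dict.empty
      = (l.filter (fun p => refOf p.1 == r)).foldl (fun d p => d.insert p.1 p.2)
          (g.getD r PySem.Dict.empty) := by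
  intro l
  induction l with
  | nil => intro g r; rfl
  | cons p l ih =>
      intro g r
      simp only [List.foldl_cons]
      rw [ih (stepB g p) r]
      by_cases h : refOf p.1 = r
      · subst h
        rw [show (stepB g p).getD (refOf p.1) PySem.Dict.empty
              = (g.getD (refOf p.1) PySem.Dict.empty).insert p.1 p.2 from
            PySem.Dict.getD_insert_self _ _ _ _]
        simp
      · rw [show (stepB g p).getD r PySem.Dict.empty = g.getD r PySem.Dict.empty from
            PySem.Dict.getD_insert_of_ne _ _ _ (Ne.symm h)]
        simp [h]

theorem items_foldIns : ∀ (m : List (String × Int)) (d : PySem.Dict String Int),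
    (d.keys ++ m.map Prod.fst).Nodup →
    (m.foldl (fun d p => d.insert p.1 p.2) d).items = d.items ++ m := by
  intro m
  induction m with
  | nil => intro d _; simp
  | cons p m ih =>
      intro d hnd
      have hkm : p.1 ∉ d.keys := by
        rw [List.map_cons, List.nodup_append] at hnd
        intro h
        exact hnd.2.2 p.1 h p.1 (by simp) rfl
      have hc : d.contains p.1 = false := by
        rcases h : d.contains p.1 with _ | _
        · rfl
        · exact absurd ((PySem.Dict.contains_iff_mem_keys d p.1).mp h) hkm
      simp only [List.foldl_cons]
      rw [ih (d.insert p.1 p.2)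
          (by rw [PySem.Dict.keys_insert_of_not_contains _ _ hc]
              simpa [List.append_assoc] using hnd),
        PySem.Dict.items_insert_of_not_contains _ _ hc]
      simp

-- ===== VERDICT (by name: the statement is the Claim_ definition above) =====
theorem group_trials_by_ref_spec : Claim_equal_group_trials_by_ref := by
  intro trials _ hpre
  unfold Spec_group_trials_by_ref
  have hA : group_trials_by_ref trials
      = (trials.foldl stepB PySem.Dict.empty).items.map (fun q => (q.1, q.2.items)) := by
    show (trials.foldl (fun g p =>
        let reference := refOf p.1
        let g := if g.contains reference then g else g.insert reference PySem.Dict.empty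
        g.modify reference PySem.Dict.empty
          (fun inner => inner.insert p.1 ((PySem.Dict.mk trials).getD p.1 0)))
        PySem.Dict.empty).items.map (fun q => (q.1, q.2.items)) = _
    rw [foldA_eq_foldB trials hpre]
  rw [hA]
  have hkeys : (trials.foldl stepB PySem.Dict.empty).keys
      = PySem.Set.ofList (trials.map (fun p => refOf p.1)) := by
    rw [keys_foldB trials PySem.Dict.empty, PySem.Dict.keys_empty]
    rfl
  have hnodup : (trials.foldl stepB PySem.Dict.empty).keys.Nodup := by
    rw [hkeys]; exact PySem.Set.nodup_ofList _
  have hget : ∀ r, ((trials.foldl stepB PySem.Dict.empty).getD r PySem.Dict.empty).items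
      = trials.filter (fun p => refOf p.1 == r) := by
    intro r
    rw [getD_foldB trials PySem.Dict.empty r, PySem.Dict.getD_empty]
    rw [items_foldIns _ PySem.Dict.empty
        (by rw [PySem.Dict.keys_empty]
            simpa using (List.filter_sublist.map Prod.fst).nodup hpre)]
    simp [PySem.Dict.empty]
  unfold group_trials_by_ref_alt
  rw [PySem.List.dedup_eq_ofList, ← hkeys, PySem.Dict.keys, List.map_map]
  apply List.map_congr_left
  intro q hq
  have : (trials.foldl stepB PySem.Dict.empty).getD q.1 PySem.Dict.empty = q.2 :=
    PySem.Dict.getD_of_mem_items _ (by simpa using hq) hnodup _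
  simp only [Function.comp]
  rw [← hget q.1, this]
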